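-- pv_equiv track=rewrite | github.com/nikilvishnu97/python_comp | distance_betwen_duplicates.py | distance_between_duplicates
-- ===== SOURCE A (Python) =====
-- def distance_between_duplicates(arr):
--     visited_map={}
--     final_arr = []
--     for index,ele in enumerate(arr):
--         if ele not in visited_map:
--             visited_map[ele]=index
--         else:
--             final_arr.append(index-visited_map[ele])
--     return max(final_arr)
-- ===== SOURCE B (Python) =====
-- def distance_between_duplicates(arr):
--     # Brute force without any hash map: for each position k, if its value occurs
--     # again later, record the distance from k to the LAST such occurrence
--     # (found by scanning the reversed suffix); return the max of those distances.
--     gaps = []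
--     for k in range(len(arr)):
--         tail = arr[k + 1:]
--         if arr[k] in tail:
--             gaps.append(len(tail) - tail[::-1].index(arr[k]))
--     return max(gaps)
-- ===== Notes on version B (the rewrite author's own statement) =====
-- stated objective: alternative
-- what changed: A makes one hash-map pass emitting a gap (index minus remembered first index) per repeated occurrence; B uses no map at all: for every position whose value reappears later it scans the reversed suffix to find the LAST later occurrence and records that distance, then takes the max.
import Mathlib
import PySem

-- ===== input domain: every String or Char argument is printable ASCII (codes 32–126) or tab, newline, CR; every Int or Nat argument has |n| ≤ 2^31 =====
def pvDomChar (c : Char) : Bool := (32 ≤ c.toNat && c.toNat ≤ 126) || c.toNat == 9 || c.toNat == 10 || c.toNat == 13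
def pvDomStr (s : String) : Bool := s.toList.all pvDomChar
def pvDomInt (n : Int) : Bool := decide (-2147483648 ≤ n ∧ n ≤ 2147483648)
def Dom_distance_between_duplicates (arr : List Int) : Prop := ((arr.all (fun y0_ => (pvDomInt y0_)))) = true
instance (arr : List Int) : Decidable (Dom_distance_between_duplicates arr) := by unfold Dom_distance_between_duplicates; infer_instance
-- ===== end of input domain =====

-- B drops A's hash map entirely: for each position whose value reappears later it scans the
-- reversed suffix for the last occurrence and records that distance, then takes the max —
-- a dictionary-free quadratic brute force; alternative algorithm, not faster.
-- Both raise ValueError (Pre_ excludes) when the input has no duplicate.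


-- ===== PORT A =====
def distance_between_duplicates (arr : List Int) : Int :=
  let st := (PySem.List.enumerate arr).foldl
    (fun (st : PySem.Dict Int Int × List Int) p =>
      if st.1.contains p.2 = false then (st.1.insert p.2 p.1, st.2)
      else (st.1, st.2 ++ [p.1 - st.1.getD p.2 0]))
    (PySem.Dict.empty, [])
  -- max(final_arr): ValueError (none) excluded by Pre_
  (PySem.List.max? st.2 (fun x => x)).getD 0

-- ===== PORT B =====
def distance_between_duplicates_alt (arr : List Int) : Int :=
  let gaps := (PySem.List.pyRange 0 arr.length 1).foldl
    (fun (gaps : List Int) k =>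
      let tail := PySem.List.slice arr (some (k + 1)) none
      -- arr[k]: in range since k comes from range(len(arr)); tail[::-1] is slice with step -1;
      -- tail[::-1].index(arr[k]): ValueError impossible, guarded by the membership test
      if tail.contains (PySem.List.pyGetD arr k 0) then
        gaps ++ [(tail.length : Int) -
          (((PySem.List.index? ((PySem.List.slice? tail none none (-1)).getD [])
              (PySem.List.pyGetD arr k 0)).getD 0 : Nat) : Int)]
      else gaps)
    []
  -- max(gaps): ValueError (none) excluded by Pre_
  (PySem.List.max? gaps (fun x => x)).getD 0

-- ===== PRECONDITION & SPEC =====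
-- Pre_ excludes inputs with no duplicated element: there both A and B raise ValueError (max of an empty list).
def Pre_distance_between_duplicates (arr : List Int) : Prop := ¬ arr.Nodup
instance (arr : List Int) : Decidable (Pre_distance_between_duplicates arr) := by unfold Pre_distance_between_duplicates; infer_instance
def pvWitness_distance_between_duplicates : List Int := [1, 2, 1]

def Spec_distance_between_duplicates (arr : List Int) (out : Int) : Prop := out = distance_between_duplicates_alt arr
instance (arr : List Int) (out : Int) : Decidable (Spec_distance_between_duplicates arr out) := by unfold Spec_distance_between_duplicates; infer_instance

-- ===== CLAIM (what is proved, stated in full; the proofs are below) =====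
def Claim_equal_distance_between_duplicates : Prop := ∀ (arr : List Int), Dom_distance_between_duplicates arr → Pre_distance_between_duplicates arr → Spec_distance_between_duplicates arr (distance_between_duplicates arr)

-- ===== LEMMAS AND PROOFS =====

-- A's loop, as a function of the list alone
def pvAFold (xs : List Int) : PySem.Dict Int Int × List Int :=
  (PySem.List.enumerate xs).foldl
    (fun (st : PySem.Dict Int Int × List Int) p =>
      if st.1.contains p.2 = false then (st.1.insert p.2 p.1, st.2)
      else (st.1, st.2 ++ [p.1 - st.1.getD p.2 0]))
    (PySem.Dict.empty, [])

-- B's gap list, in filter/map form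
def pvBP (arr : List Int) (k : Int) : Bool :=
  (PySem.List.slice arr (some (k + 1)) none).contains (PySem.List.pyGetD arr k 0)
def pvBF (arr : List Int) (k : Int) : Int :=
  ((PySem.List.slice arr (some (k + 1)) none).length : Int) -
    (((PySem.List.index? ((PySem.List.slice? (PySem.List.slice arr (some (k + 1)) none) none none (-1)).getD [])
        (PySem.List.pyGetD arr k 0)).getD 0 : Nat) : Int)
def pvBGaps (arr : List Int) : List Int :=
  ((PySem.List.pyRange 0 arr.length 1).filter (pvBP arr)).map (pvBF arr)

-- last occurrence index of v in xs
def pvLast (xs : List Int) (v : Int) : Nat := xs.length - 1 - List.idxOf v xs.reverse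

lemma pvA_eq (arr : List Int) :
    distance_between_duplicates arr = (PySem.List.max? (pvAFold arr).2 (fun x => x)).getD 0 := rfl

lemma pvB_eq (arr : List Int) :
    distance_between_duplicates_alt arr = (PySem.List.max? (pvBGaps arr) (fun x => x)).getD 0 := by
  unfold distance_between_duplicates_alt pvBGaps
  have h : (fun (gaps : List Int) (k : Int) =>
      let tail := PySem.List.slice arr (some (k + 1)) none
      if tail.contains (PySem.List.pyGetD arr k 0) then
        gaps ++ [(tail.length : Int) -
          (((PySem.List.index? ((PySem.List.slice? tail none none (-1)).getD [])
              (PySem.List.pyGetD arr k 0)).getD 0 : Nat) : Int)]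
      else gaps)
    = (fun (acc : List Int) (x : Int) => if pvBP arr x = true then acc ++ [pvBF arr x] else acc) := rfl
  rw [h, PySem.List.foldl_append_if (pvBP arr) (pvBF arr)]
  rfl

-- first occurrence is minimal
lemma pv_idxOf_le (xs : List Int) (v : Int) (i : Nat) (h : i < xs.length) (he : xs[i] = v) :
    List.idxOf v xs ≤ i := by
  induction xs generalizing i with
  | nil => cases h
  | cons a t ih =>
      rw [List.idxOf_cons]
      cases i with
      | zero => simp at he; simp [he]
      | succ i =>
          cases hb : (a == v) with
          | true => simp
          | false =>
              simp only [cond_false]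
              have := ih i (by simpa using h) (by simpa using he)
              omega

lemma pv_last_spec (xs : List Int) (v : Int) (h : v ∈ xs) :
    ∃ h2 : pvLast xs v < xs.length, xs[pvLast xs v] = v := by
  have hm : v ∈ xs.reverse := List.mem_reverse.mpr h
  have hlt : List.idxOf v xs.reverse < xs.reverse.length := List.idxOf_lt_length_iff.mpr hm
  rw [List.length_reverse] at hlt
  have hlen : 0 < xs.length := List.length_pos_of_mem h
  refine ⟨by unfold pvLast; omega, ?_⟩
  have := List.getElem_idxOf (x := v) (xs := xs.reverse)
    (by rw [List.length_reverse]; exact hlt)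
  rw [List.getElem_reverse] at this
  unfold pvLast
  convert this using 2

-- every occurrence is at most the last one
lemma pv_le_last (xs : List Int) (v : Int) (i : Nat) (h : i < xs.length) (he : xs[i] = v) :
    i ≤ pvLast xs v := by
  have hrev : xs.reverse[xs.length - 1 - i]'(by rw [List.length_reverse]; omega) = v := by
    rw [List.getElem_reverse]
    convert he using 2
    omega
  have := pv_idxOf_le xs.reverse v (xs.length - 1 - i)
    (by rw [List.length_reverse]; omega) hrev
  unfold pvLast
  omega

-- max of two lists agrees when each is cofinal in the other
lemma pv_mx_congr (xs ys : List Int) (h1 : xs = [] ↔ ys = [])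
    (h2 : ∀ x ∈ xs, ∃ y ∈ ys, x ≤ y) (h3 : ∀ y ∈ ys, ∃ x ∈ xs, y ≤ x) :
    PySem.List.max? xs (fun x => x) = PySem.List.max? ys (fun x => x) := by
  cases hx : PySem.List.max? xs (fun x => x) with
  | none =>
      rw [PySem.List.max?_eq_none_iff] at hx
      rw [eq_comm, PySem.List.max?_eq_none_iff]
      exact h1.mp hx
  | some m =>
      have hmem := PySem.List.max?_mem hx
      cases hy : PySem.List.max? ys (fun x => x) with
      | none =>
          rw [PySem.List.max?_eq_none_iff] at hy
          rw [h1.mpr hy] at hmem; cases hmem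
      | some m' =>
          have hmem' := PySem.List.max?_mem hy
          obtain ⟨y, hyin, hley⟩ := h2 m hmem
          obtain ⟨x, hxin, hlex⟩ := h3 m' hmem'
          have h4 := PySem.List.max?_isMax hy y hyin
          have h5 := PySem.List.max?_isMax hx x hxin
          simp only at h4 h5
          exact congrArg some (le_antisymm (le_trans hley h4) (le_trans hlex h5))

lemma pvAFold_append (xs : List Int) (x : Int) :
    pvAFold (xs ++ [x]) =
      (if (pvAFold xs).1.contains x = false
        then ((pvAFold xs).1.insert x (xs.length : Int), (pvAFold xs).2)
        else ((pvAFold xs).1, (pvAFold xs).2 ++ [(xs.length : Int) - (pvAFold xs).1.getD x 0])) := by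
  unfold pvAFold
  rw [PySem.List.enumerate_append, List.foldl_append]
  simp [PySem.List.enumerate_cons, PySem.List.enumerate_nil]

-- A-loop invariant: dict maps each seen value to its first index; gap list characterized
lemma pvA_inv (xs : List Int) :
    (∀ v : Int, (pvAFold xs).1.get? v =
        if v ∈ xs then some ((List.idxOf v xs : Int)) else none)
  ∧ (∀ x : Int, x ∈ (pvAFold xs).2 ↔
      ∃ (j : Nat) (hj : j < xs.length), xs[j] ∈ xs.take j ∧
        x = (j : Int) - (List.idxOf xs[j] xs : Int)) := by
  induction xs using List.reverseRecOn with
  | nil =>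
      constructor
      · intro v
        simp [pvAFold, PySem.List.enumerate_nil, PySem.Dict.empty, PySem.Dict.get?]
      · intro x
        simp [pvAFold, PySem.List.enumerate_nil]
  | append_singleton xs x ih =>
      obtain ⟨ihd, ihg⟩ := ih
      have hc : (pvAFold xs).1.contains x = (if x ∈ xs then true else false) := by
        rw [PySem.Dict.contains_eq_isSome_get?, ihd x]
        split <;> rfl
      -- getElem / take / idxOf over the appended element, for indices below xs.length
      have hget : ∀ (j : Nat) (hj : j < xs.length),
          (xs ++ [x])[j]'(by simp; omega) = xs[j] := fun j hj => List.getElem_append_left ..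
      have htake : ∀ (j : Nat), j ≤ xs.length → (xs ++ [x]).take j = xs.take j := by
        intro j hj
        rw [List.take_append_of_le_length hj]
      have hidxmem : ∀ v : Int, v ∈ xs → List.idxOf v (xs ++ [x]) = List.idxOf v xs := by
        intro v hv
        rw [List.idxOf_append, if_pos hv]
      have hgetlast : (xs ++ [x])[xs.length]'(by simp) = x := by
        simp
      by_cases hx : x ∈ xs
      · -- duplicate value: dict unchanged, one gap appended
        rw [pvAFold_append, hc, if_pos hx]
        simp only [Bool.true_eq_false, if_false]
        constructor
        · intro v
          rw [ihd v]
          by_cases hv : v ∈ xs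
          · rw [if_pos hv, if_pos (List.mem_append.mpr (Or.inl hv)), hidxmem v hv]
          · have hvx : v ≠ x := fun h => hv (h ▸ hx)
            rw [if_neg hv, if_neg (by simp [hv, hvx])]
        · intro g
          rw [List.mem_append]
          have hval : (pvAFold xs).1.getD x 0 = (List.idxOf x xs : Int) := by
            rw [PySem.Dict.getD_eq_get?_getD, ihd x, if_pos hx]
            rfl
          constructor
          · rintro (hg | hg)
            · obtain ⟨j, hj, hmem, rfl⟩ := (ihg g).mp hg
              refine ⟨j, by simp; omega, ?_, ?_⟩
              · rw [hget j hj, htake j (by omega)]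
                exact hmem
              · rw [hget j hj, hidxmem _ (List.getElem_mem hj)]
            · simp only [List.mem_singleton] at hg
              refine ⟨xs.length, by simp, ?_, ?_⟩
              · rw [hgetlast, htake xs.length le_rfl, List.take_length]
                exact hx
              · rw [hgetlast, hidxmem x hx, hg, hval]
          · rintro ⟨j, hj, hmem, rfl⟩
            by_cases hjl : j < xs.length
            · left
              refine (ihg _).mpr ⟨j, hjl, ?_, ?_⟩
              · rw [hget j hjl, htake j (by omega)] at hmem
                exact hmem
              · rw [hget j hjl, hidxmem _ (List.getElem_mem hjl)]
            · have hje : j = xs.length := by simp at hj; omega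
              right
              subst hje
              rw [hgetlast, hidxmem x hx, hval]
              simp
      · -- fresh value: dict gains it, gaps unchanged
        rw [pvAFold_append, hc, if_neg hx]
        simp only [reduceIte]
        constructor
        · intro v
          rw [PySem.Dict.get?_insert]
          split
          · next hvx =>
              subst hvx
              rw [if_pos (List.mem_append.mpr (Or.inr (List.mem_singleton.mpr rfl)))]
              rw [List.idxOf_append, if_neg hx]
              simp
          · next hvx =>
              rw [ihd v]
              by_cases hv : v ∈ xs
              · rw [if_pos hv, if_pos (List.mem_append.mpr (Or.inl hv)), hidxmem v hv]
              · rw [if_neg hv, if_neg (by simp [hv, hvx])]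
        · intro g
          constructor
          · intro hg
            obtain ⟨j, hj, hmem, rfl⟩ := (ihg g).mp hg
            refine ⟨j, by simp; omega, ?_, ?_⟩
            · rw [hget j hj, htake j (by omega)]
              exact hmem
            · rw [hget j hj, hidxmem _ (List.getElem_mem hj)]
          · rintro ⟨j, hj, hmem, rfl⟩
            by_cases hjl : j < xs.length
            · refine (ihg _).mpr ⟨j, hjl, ?_, ?_⟩
              · rw [hget j hjl, htake j (by omega)] at hmem
                exact hmem
              · rw [hget j hjl, hidxmem _ (List.getElem_mem hjl)]
            · exfalso
              have hje : j = xs.length := by simp at hj; omega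
              subst hje
              rw [hgetlast, htake xs.length le_rfl, List.take_length] at hmem
              exact hx hmem

lemma pv_mem_take_iff (xs : List Int) (v : Int) (j : Nat) :
    v ∈ xs.take j ↔ ∃ i, i < j ∧ ∃ h : i < xs.length, xs[i] = v := by
  rw [List.mem_take_iff_getElem]
  constructor
  · rintro ⟨i, hi, rfl⟩
    exact ⟨i, lt_of_lt_of_le hi (min_le_left ..), lt_of_lt_of_le hi (min_le_right ..), rfl⟩
  · rintro ⟨i, hi, h, rfl⟩
    exact ⟨i, by omega, rfl⟩

lemma pv_mem_drop_iff (xs : List Int) (v : Int) (m : Nat) :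
    v ∈ xs.drop m ↔ ∃ i, m ≤ i ∧ ∃ h : i < xs.length, xs[i] = v := by
  rw [List.mem_drop_iff_getElem]
  constructor
  · rintro ⟨i, hi, rfl⟩
    exact ⟨m + i, by omega, by omega, rfl⟩
  · rintro ⟨i, hi, h, rfl⟩
    exact ⟨i - m, by omega, by congr 1; omega⟩

lemma pvBP_iff (arr : List Int) (j : Nat) (hj : j < arr.length) :
    pvBP arr (j : Int) = true ↔ arr[j] ∈ arr.drop (j + 1) := by
  unfold pvBP
  have h1 : PySem.List.slice arr (some ((j : Int) + 1)) none = arr.drop (j + 1) := by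
    rw [show ((j : Int) + 1) = (((j + 1 : Nat) : Int)) by push_cast; ring]
    exact PySem.List.slice_from_natCast ..
  have h2 : PySem.List.pyGetD arr (j : Int) 0 = arr[j] := by
    rw [PySem.List.pyGetD_natCast, List.getD_eq_getElem arr 0 hj]
  rw [h1, h2]
  simp

lemma pvBF_eq (arr : List Int) (j : Nat) (hj : j < arr.length)
    (hmem : arr[j] ∈ arr.drop (j + 1)) :
    pvBF arr (j : Int) = ((pvLast arr arr[j] : Int)) - (j : Int) := by
  unfold pvBF
  have h1 : PySem.List.slice arr (some ((j : Int) + 1)) none = arr.drop (j + 1) := by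
    rw [show ((j : Int) + 1) = (((j + 1 : Nat) : Int)) by push_cast; ring]
    exact PySem.List.slice_from_natCast ..
  have h2 : PySem.List.pyGetD arr (j : Int) 0 = arr[j] := by
    rw [PySem.List.pyGetD_natCast, List.getD_eq_getElem arr 0 hj]
  rw [h1, h2, PySem.List.slice?_none_none_neg_one]
  simp only [Option.getD_some]
  have hmr : arr[j] ∈ (arr.drop (j + 1)).reverse := List.mem_reverse.mpr hmem
  have hidx : PySem.List.index? (arr.drop (j + 1)).reverse arr[j]
      = some (List.idxOf arr[j] (arr.drop (j + 1)).reverse) := by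
    rw [PySem.List.index?_eq_idxOf?]
    rw [List.idxOf_eq_getD_idxOf?] at *
    cases hh : List.idxOf? arr[j] (arr.drop (j + 1)).reverse with
    | none =>
        exfalso
        rw [List.idxOf?_eq_none_iff] at hh
        exact hh hmr
    | some m => simp
  rw [hidx]
  simp only [Option.getD_some]
  -- idxOf in the reversed suffix = idxOf in the reversed whole list
  have hsplit : arr.reverse = (arr.drop (j + 1)).reverse ++ (arr.take (j + 1)).reverse := by
    rw [← List.reverse_append, List.take_append_drop]
  have hidx2 : List.idxOf arr[j] arr.reverse = List.idxOf arr[j] (arr.drop (j + 1)).reverse := by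
    rw [hsplit, List.idxOf_append, if_pos hmr]
  have hlt : List.idxOf arr[j] (arr.drop (j + 1)).reverse < (arr.drop (j + 1)).length := by
    have := List.idxOf_lt_length_iff.mpr hmr
    simpa using this
  have hld : (arr.drop (j + 1)).length = arr.length - (j + 1) := List.length_drop
  unfold pvLast
  rw [hidx2]
  omega

-- B-list characterization
lemma pvB_char (arr : List Int) (y : Int) :
    y ∈ pvBGaps arr ↔
      ∃ (k : Nat) (hk : k < arr.length), arr[k] ∈ arr.drop (k + 1) ∧
        y = ((pvLast arr arr[k] : Int)) - (k : Int) := by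
  unfold pvBGaps
  rw [List.mem_map]
  constructor
  · rintro ⟨k, hk, rfl⟩
    rw [List.mem_filter] at hk
    obtain ⟨hkr, hp⟩ := hk
    rw [PySem.List.mem_pyRange_one] at hkr
    have hkj : k = ((k.toNat : Nat) : Int) := by omega
    have hjn : k.toNat < arr.length := by omega
    rw [hkj] at hp ⊢
    exact ⟨k.toNat, hjn, (pvBP_iff arr k.toNat hjn).mp hp, (pvBF_eq arr k.toNat hjn
      ((pvBP_iff arr k.toNat hjn).mp hp)).symm ▸ rfl⟩
  · rintro ⟨j, hj, hmem, rfl⟩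
    refine ⟨(j : Int), ?_, pvBF_eq arr j hj hmem⟩
    rw [List.mem_filter, PySem.List.mem_pyRange_one]
    exact ⟨⟨by omega, by exact_mod_cast hj⟩, (pvBP_iff arr j hj).mpr hmem⟩

-- ===== VERDICT (by name: the statement is the Claim_ definition above) =====
theorem distance_between_duplicates_spec : Claim_equal_distance_between_duplicates := by
  intro arr _ hpre
  unfold Spec_distance_between_duplicates
  rw [pvA_eq, pvB_eq]
  have hA := (pvA_inv arr).2
  have hB := pvB_char arr
  refine congrArg (Option.getD · 0) (pv_mx_congr _ _ ?_ ?_ ?_)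
  · -- both gap lists are empty exactly when no index sees an earlier/later equal element
    rw [List.eq_nil_iff_forall_not_mem, List.eq_nil_iff_forall_not_mem]
    constructor
    · intro hAn y hy
      obtain ⟨k, hk, hmem, _⟩ := (hB y).mp hy
      obtain ⟨i, hik, hi, hieq⟩ := (pv_mem_drop_iff arr arr[k] (k + 1)).mp hmem
      exact hAn _ ((hA _).mpr ⟨i, hi,
        (pv_mem_take_iff arr arr[i] i).mpr ⟨k, by omega, hk, hieq.symm⟩, rfl⟩)
    · intro hBn x hx
      obtain ⟨j, hj, hmem, _⟩ := (hA x).mp hx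
      obtain ⟨i, hij, hi, hieq⟩ := (pv_mem_take_iff arr arr[j] j).mp hmem
      exact hBn _ ((hB _).mpr ⟨i, hi,
        (pv_mem_drop_iff arr arr[i] (i + 1)).mpr ⟨j, by omega, hj, hieq.symm⟩, rfl⟩)
  · -- every A-gap is dominated by a B-gap
    intro x hx
    obtain ⟨j, hj, hmem, rfl⟩ := (hA x).mp hx
    have hjmem : arr[j] ∈ arr := List.getElem_mem hj
    have hf : List.idxOf arr[j] arr < arr.length := List.idxOf_lt_length_iff.mpr hjmem
    have hgf : arr[List.idxOf arr[j] arr] = arr[j] := List.getElem_idxOf hf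
    obtain ⟨i, hij, hi, hieq⟩ := (pv_mem_take_iff arr arr[j] j).mp hmem
    have hfi : List.idxOf arr[j] arr ≤ i := pv_idxOf_le arr arr[j] i hi hieq
    have hdrop : arr[List.idxOf arr[j] arr] ∈ arr.drop (List.idxOf arr[j] arr + 1) :=
      (pv_mem_drop_iff arr _ _).mpr ⟨j, by omega, hj, by rw [hgf]⟩
    refine ⟨(pvLast arr arr[List.idxOf arr[j] arr] : Int) - (List.idxOf arr[j] arr : Int),
      (hB _).mpr ⟨List.idxOf arr[j] arr, hf, hdrop, rfl⟩, ?_⟩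
    have hjl : j ≤ pvLast arr arr[List.idxOf arr[j] arr] :=
      pv_le_last arr arr[List.idxOf arr[j] arr] j hj hgf.symm
    omega
  · -- every B-gap is dominated by an A-gap
    intro y hy
    obtain ⟨k, hk, hmem, rfl⟩ := (hB y).mp hy
    have hkm : arr[k] ∈ arr := List.getElem_mem hk
    obtain ⟨hl, hgl⟩ := pv_last_spec arr arr[k] hkm
    obtain ⟨i, hik, hi, hieq⟩ := (pv_mem_drop_iff arr arr[k] (k + 1)).mp hmem
    have hil : i ≤ pvLast arr arr[k] := pv_le_last arr arr[k] i hi hieq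
    have htk : arr[pvLast arr arr[k]]'hl ∈ arr.take (pvLast arr arr[k]) :=
      (pv_mem_take_iff arr _ _).mpr ⟨k, by omega, hk, by rw [hgl]⟩
    refine ⟨(pvLast arr arr[k] : Int) - (List.idxOf (arr[pvLast arr arr[k]]'hl) arr : Int),
      (hA _).mpr ⟨pvLast arr arr[k], hl, htk, rfl⟩, ?_⟩
    have hle : List.idxOf (arr[pvLast arr arr[k]]'hl) arr ≤ k :=
      pv_idxOf_le arr _ k hk hgl.symm
    omega
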